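-- pv_equiv track=rewrite | github.com/abobabo91/hunrhyme | app.py | get_rhyme_mask
-- ===== SOURCE A (Python) =====
-- def get_match_length(v1, v2):
--     """Kiszámolja, hány magánhangzó egyezik a két sor végén."""
--     match = 0
--     for i in range(1, min(len(v1), len(v2)) + 1):
--         if v1[-i] == v2[-i]:
--             match += 1
--         else:
--             break
--     return match
--
-- def get_rhyme_mask(input_vowels, line_vowels, match_count, include_internal):
--     """
--     Visszaad egy bool maszkot a line_vowels-hez.
--     """
--     mask = [False] * len(line_vowels)
--
--     # End rhyme (mindig számoljuk, ha elég hosszú)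
--     m_len = get_match_length(input_vowels, line_vowels)
--     if m_len >= match_count:
--         for i in range(1, m_len + 1):
--             mask[-i] = True
--
--     if not include_internal:
--         return mask
--
--     # Internal rhyme
--     input_substrings = set()
--     for i in range(len(input_vowels) - match_count + 1):
--         input_substrings.add(input_vowels[i:i+match_count])
--
--     for i in range(len(line_vowels) - match_count + 1):
--         sub = line_vowels[i:i+match_count]
--         if sub in input_substrings:
--             for j in range(i, i + match_count):
--                 mask[j] = True
--
--     return mask
-- ===== SOURCE B (Python) =====
-- def get_rhyme_mask(input_vowels, line_vowels, match_count, include_internal):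
--     n = len(line_vowels)
--     # common suffix length
--     m = 0
--     for a, b in zip(reversed(input_vowels), reversed(line_vowels)):
--         if a != b:
--             break
--         m += 1
--     end = m if m >= match_count else 0
--     mask = [i >= n - end for i in range(n)]
--     if include_internal and match_count > 0:
--         for i in range(n - match_count + 1):
--             if line_vowels[i:i + match_count] in input_vowels:
--                 for j in range(i, i + match_count):
--                     mask[j] = True
--     return mask
-- ===== Notes on version B (the rewrite author's own statement) =====
-- stated objective: simpler
-- what changed: B drops A's precomputed set of input substrings and tests each line window directly with native substring containment (sub in input_vowels); the end-rhyme phase is replaced by a zip-over-reversed-strings suffix count and a comprehension building the mask in one pass instead of mutating a False-list.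
import Mathlib
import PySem

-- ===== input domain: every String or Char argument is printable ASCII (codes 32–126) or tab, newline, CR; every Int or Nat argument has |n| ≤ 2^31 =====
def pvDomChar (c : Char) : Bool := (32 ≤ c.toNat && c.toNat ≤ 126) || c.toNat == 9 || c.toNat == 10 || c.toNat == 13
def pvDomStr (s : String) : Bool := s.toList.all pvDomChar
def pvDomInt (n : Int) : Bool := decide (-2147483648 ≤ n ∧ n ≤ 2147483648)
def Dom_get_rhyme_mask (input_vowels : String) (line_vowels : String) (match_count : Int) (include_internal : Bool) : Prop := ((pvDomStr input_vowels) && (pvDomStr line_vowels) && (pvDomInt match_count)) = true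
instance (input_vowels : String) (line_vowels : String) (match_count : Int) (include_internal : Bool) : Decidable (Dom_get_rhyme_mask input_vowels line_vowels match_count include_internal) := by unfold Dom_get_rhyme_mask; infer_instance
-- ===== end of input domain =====

-- B replaces A's precomputed substring set by direct native substring containment ('sub in input_vowels')
-- and builds the end-rhyme mask with a suffix count over the reversed strings; objective: simpler.

-- ===== PORT A =====
-- A's get_match_length: 'for i in range(1, min+1): if v1[-i]==v2[-i]: match+=1 else: break'
def pvGmlLoop (v1 v2 : List Char) : List Int → Int → Int
  | [], m => m
  | i :: rest, m =>
      if PySem.List.pyGet? v1 (-i) == PySem.List.pyGet? v2 (-i) then pvGmlLoop v1 v2 rest (m + 1)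
      else m

def get_match_length (v1 v2 : List Char) : Int :=
  pvGmlLoop v1 v2 (PySem.List.pyRange 1 ((min v1.length v2.length : Int) + 1) 1) 0

def get_rhyme_mask (input_vowels : String) (line_vowels : String) (match_count : Int) (include_internal : Bool) : List Bool :=
  let ivL := input_vowels.toList
  let lvL := line_vowels.toList
  let mask0 : List Bool := List.replicate lvL.length false
  let m_len := get_match_length ivL lvL
  let mask1 :=
    if m_len ≥ match_count then
      (PySem.List.pyRange 1 (m_len + 1) 1).foldl
        (fun mask i => PySem.List.pySetD mask (-i) true) mask0
    else mask0
  if !include_internal then mask1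
  else
    let input_substrings : PySem.Set (List Char) :=
      (PySem.List.pyRange 0 ((ivL.length : Int) - match_count + 1) 1).foldl
        (fun s i => PySem.Set.add s (PySem.List.slice ivL (some i) (some (i + match_count))))
        PySem.Set.empty
    (PySem.List.pyRange 0 ((lvL.length : Int) - match_count + 1) 1).foldl
      (fun mask i =>
        let sub := PySem.List.slice lvL (some i) (some (i + match_count))
        if PySem.Set.contains input_substrings sub then
          (PySem.List.pyRange i (i + match_count) 1).foldl
            (fun mask j => PySem.List.pySetD mask j true) mask
        else mask)
      mask1

-- ===== PORT B =====
-- Source B's 'for a, b in zip(reversed(iv), reversed(lv)): if a != b: break; m += 1'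
def pvSuffixLen : List Char → List Char → Nat
  | a :: as_, b :: bs => if a ≠ b then 0 else pvSuffixLen as_ bs + 1
  | _, _ => 0

def get_rhyme_mask_alt (input_vowels : String) (line_vowels : String) (match_count : Int) (include_internal : Bool) : List Bool :=
  let ivL := input_vowels.toList
  let lvL := line_vowels.toList
  let n := lvL.length
  let m := pvSuffixLen ivL.reverse lvL.reverse
  let end_ : Int := if (m : Int) ≥ match_count then (m : Int) else 0
  let mask : List Bool := (List.range n).map (fun (i : Nat) => decide ((i : Int) ≥ (n : Int) - end_))
  if include_internal && decide (match_count > 0) then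
    (PySem.List.pyRange 0 ((n : Int) - match_count + 1) 1).foldl
      (fun mask i =>
        if PySem.Chars.isIn (PySem.List.slice lvL (some i) (some (i + match_count))) ivL then
          (PySem.List.pyRange i (i + match_count) 1).foldl
            (fun mask j => PySem.List.pySetD mask j true) mask
        else mask)
      mask
  else mask

-- ===== PRECONDITION & SPEC =====
def Spec_get_rhyme_mask (input_vowels : String) (line_vowels : String) (match_count : Int) (include_internal : Bool) (out : List Bool) : Prop := out = get_rhyme_mask_alt input_vowels line_vowels match_count include_internal
instance (input_vowels : String) (line_vowels : String) (match_count : Int) (include_internal : Bool) (out : List Bool) : Decidable (Spec_get_rhyme_mask input_vowels line_vowels match_count include_internal out) := by unfold Spec_get_rhyme_mask; infer_instance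

-- ===== CLAIM (what is proved, stated in full; the proofs are below) =====
def Claim_equal_get_rhyme_mask : Prop := ∀ (input_vowels : String) (line_vowels : String) (match_count : Int) (include_internal : Bool), Dom_get_rhyme_mask input_vowels line_vowels match_count include_internal → Spec_get_rhyme_mask input_vowels line_vowels match_count include_internal (get_rhyme_mask input_vowels line_vowels match_count include_internal)

-- ===== LEMMAS AND PROOFS =====

-- A's end-of-string match loop equals B's suffix count over the reversed lists.
theorem pvGmlLoop_eq (v1 v2 : List Char) :
    ∀ d m : Nat, m + d = min v1.length v2.length →
      pvGmlLoop v1 v2 (PySem.List.pyRange ((m : Int) + 1) ((min v1.length v2.length : Int) + 1) 1) (m : Int)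
        = (m : Int) + (pvSuffixLen (v1.reverse.drop m) (v2.reverse.drop m) : Int) := by
  intro d
  induction d with
  | zero =>
      intro m hm
      rw [PySem.List.pyRange_one_eq_nil (by omega)]
      have h1 : v1.reverse.drop m = [] ∨ v2.reverse.drop m = [] := by
        rcases Nat.le_total v1.length v2.length with h | h
        · left; apply List.drop_eq_nil_of_le; simp; omega
        · right; apply List.drop_eq_nil_of_le; simp; omega
      have h2 : pvSuffixLen (v1.reverse.drop m) (v2.reverse.drop m) = 0 := by
        rcases h1 with h | h
        · rw [h]; cases hh : v2.reverse.drop m <;> simp [pvSuffixLen]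
        · rw [h]; cases hh : v1.reverse.drop m <;> simp [pvSuffixLen]
      simp [pvGmlLoop, h2]
  | succ d ih =>
      intro m hm
      have hm1 : m + 1 ≤ v1.length := by omega
      have hm2 : m + 1 ≤ v2.length := by omega
      have hb1 : m < v1.reverse.length := by simp; omega
      have hb2 : m < v2.reverse.length := by simp; omega
      have hg1 : PySem.List.pyGet? v1 (-((m : Int) + 1)) = v1[v1.length - (m + 1)]? := by
        have h := PySem.List.pyGet?_neg_ofNat v1 (m + 1) (by omega) hm1
        rw [← h]; congr 1
      have hg2 : PySem.List.pyGet? v2 (-((m : Int) + 1)) = v2[v2.length - (m + 1)]? := by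
        have h := PySem.List.pyGet?_neg_ofNat v2 (m + 1) (by omega) hm2
        rw [← h]; congr 1
      have hd1 := List.drop_eq_getElem_cons hb1
      have hd2 := List.drop_eq_getElem_cons hb2
      have hsome1 : v1[v1.length - (m + 1)]? = some v1.reverse[m] := by
        rw [show v1.length - (m + 1) = v1.length - 1 - m by omega]
        rw [List.getElem?_eq_getElem (by omega : v1.length - 1 - m < v1.length)]
        congr 1
        exact (List.getElem_reverse hb1).symm
      have hsome2 : v2[v2.length - (m + 1)]? = some v2.reverse[m] := by
        rw [show v2.length - (m + 1) = v2.length - 1 - m by omega]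
        rw [List.getElem?_eq_getElem (by omega : v2.length - 1 - m < v2.length)]
        congr 1
        exact (List.getElem_reverse hb2).symm
      rw [PySem.List.pyRange_one_cons (by omega)]
      simp only [pvGmlLoop, hg1, hg2, hsome1, hsome2]
      by_cases heq : v1.reverse[m] = v2.reverse[m]
      · rw [if_pos (show (some v1.reverse[m] == some v2.reverse[m]) = true by
          simp only [beq_iff_eq, Option.some.injEq]; exact heq)]
        rw [show ((m : Int) + 1) + 1 = ((m + 1 : Nat) : Int) + 1 by push_cast; ring]
        rw [show ((m : Int) + 1) = ((m + 1 : Nat) : Int) by push_cast; ring]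
        rw [ih (m + 1) (by omega)]
        rw [hd1, hd2]
        simp only [pvSuffixLen, if_neg (show ¬ (v1.reverse[m] ≠ v2.reverse[m]) by simp [heq])]
        push_cast; ring
      · rw [if_neg (show ¬ (some v1.reverse[m] == some v2.reverse[m]) = true by
          simp only [beq_iff_eq, Option.some.injEq]; exact heq)]
        rw [hd1, hd2]
        simp only [pvSuffixLen, if_pos (show v1.reverse[m] ≠ v2.reverse[m] from heq)]
        simp

theorem get_match_length_eq (v1 v2 : List Char) :
    get_match_length v1 v2 = (pvSuffixLen v1.reverse v2.reverse : Int) := by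
  have := pvGmlLoop_eq v1 v2 (min v1.length v2.length) 0 (by omega)
  simpa [get_match_length] using this

theorem pvSuffixLen_le (as_ bs : List Char) : pvSuffixLen as_ bs ≤ bs.length := by
  induction as_ generalizing bs with
  | nil => cases bs <;> simp [pvSuffixLen]
  | cons a as_ ih =>
      cases bs with
      | nil => simp [pvSuffixLen]
      | cons b bs =>
          simp only [pvSuffixLen]
          split_ifs
          · simp
          · have := ih bs; simp; omega

-- Setting mask[-k] (1 ≤ k ≤ length) is List.set at index length - k.
theorem pvSetD_neg (xs : List Bool) (k : Nat) (h1 : 0 < k) (h2 : k ≤ xs.length) (v : Bool) :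
    PySem.List.pySetD xs (-(k : Int)) v = xs.set (xs.length - k) v := by
  have hk : PySem.List.pyIdx? xs.length (-(k : Int)) = some (xs.length - k) := by
    unfold PySem.List.pyIdx?
    rw [if_neg (by omega), if_pos (by omega)]
    congr 1
    omega
  simp [PySem.List.pySetD, PySem.List.pySet?, hk]

-- The end-rhyme phase: marking the last s positions of an all-False mask gives B's comprehension mask.
theorem pvEndMask (n : Nat) (s : Nat) (hs : s ≤ n) :
    (PySem.List.pyRange 1 ((s : Int) + 1) 1).foldl
        (fun mask i => PySem.List.pySetD mask (-i) true) (List.replicate n false)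
      = (List.range n).map (fun (i : Nat) => decide ((i : Int) ≥ (n : Int) - (s : Int))) := by
  induction s with
  | zero =>
      rw [PySem.List.pyRange_one_eq_nil (by simp)]
      simp only [List.foldl_nil]
      apply List.ext_getElem (by simp)
      intro j hj hj'
      have hjn : j < n := by simpa using hj
      simp only [List.getElem_replicate, List.getElem_map, List.getElem_range]
      symm; rw [decide_eq_false_iff_not]; push_cast; omega
  | succ s ih =>
      have hs' : s ≤ n := by omega
      rw [show ((s + 1 : Nat) : Int) + 1 = ((s : Int) + 1) + 1 by push_cast; ring]
      rw [PySem.List.pyRange_one_succ_right (by omega), List.foldl_append, ih hs']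
      simp only [List.foldl_cons, List.foldl_nil]
      rw [show ((s : Int) + 1) = ((s + 1 : Nat) : Int) by push_cast; ring]
      rw [pvSetD_neg _ (s + 1) (by omega) (by simp; omega)]
      rw [show ((List.range n).map (fun (i : Nat) => decide ((i : Int) ≥ (n : Int) - (s : Int)))).length = n from by simp]
      apply List.ext_getElem (by simp)
      intro j hj hj'
      have hjn : j < n := by simpa using hj
      rw [List.getElem_set]
      simp only [List.getElem_map, List.getElem_range]
      split_ifs with hje
      · symm; rw [decide_eq_true_eq]; push_cast; omega
      · rw [decide_eq_decide]; push_cast; omega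

-- Membership of a full-length window in A's substring set is substring containment.
theorem pvSubsetMember (ivL : List Char) (mc : Int) (hmc : 0 < mc) (sub : List Char)
    (hlen : sub.length = mc.toNat) :
    PySem.Set.contains
        ((PySem.List.pyRange 0 ((ivL.length : Int) - mc + 1) 1).foldl
          (fun s i => PySem.Set.add s (PySem.List.slice ivL (some i) (some (i + mc))))
          PySem.Set.empty) sub
      = PySem.Chars.isIn sub ivL := by
  have hset : (PySem.List.pyRange 0 ((ivL.length : Int) - mc + 1) 1).foldl
      (fun s i => PySem.Set.add s (PySem.List.slice ivL (some i) (some (i + mc))))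
      PySem.Set.empty
      = PySem.Set.ofList ((PySem.List.pyRange 0 ((ivL.length : Int) - mc + 1) 1).map
          (fun i => PySem.List.slice ivL (some i) (some (i + mc)))) := by
    rw [PySem.Set.ofList_eq_foldl, List.foldl_map]
    rfl
  rw [hset]
  by_cases h : sub <:+: ivL
  · rw [(PySem.Chars.isIn_iff_infix sub ivL).mpr h]
    apply (PySem.Set.contains_iff _ _).mpr
    rw [PySem.Set.mem_ofList, List.mem_map]
    obtain ⟨s, t, hst⟩ := h
    have hL : s.length + sub.length + t.length = ivL.length := by
      rw [← hst]; simp; omega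
    refine ⟨(s.length : Int), ?_, ?_⟩
    · rw [PySem.List.mem_pyRange_one]
      constructor
      · omega
      · omega
    · rw [PySem.List.slice_toNat _ (by omega) (by omega)]
      have h1 : ((s.length : Int) + mc).toNat - ((s.length : Int)).toNat = mc.toNat := by omega
      have h2 : ((s.length : Int)).toNat = s.length := by omega
      rw [h1, h2, ← hst, List.append_assoc, List.drop_left, ← hlen, List.take_left]
  · have h' : PySem.Chars.isIn sub ivL = false := by
      rw [PySem.Chars.isIn_eq_false_iff]; exact h
    rw [h']
    apply Bool.eq_false_iff.mpr
    intro hc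
    apply h
    rw [PySem.Set.contains_iff, PySem.Set.mem_ofList, List.mem_map] at hc
    obtain ⟨k, hk, hsl⟩ := hc
    rw [PySem.List.mem_pyRange_one] at hk
    rw [PySem.List.slice_toNat _ (by omega) (by omega)] at hsl
    have h1 : (k + mc).toNat - k.toNat = mc.toNat := by omega
    rw [h1] at hsl
    rw [← hsl]
    exact (List.IsPrefix.isInfix (List.take_prefix _ _)).trans
      (List.IsSuffix.isInfix (List.drop_suffix _ _))

-- The internal phase: A's set-membership loop equals B's guarded substring-containment loop,
-- from any common starting mask M.
theorem pvInternalPhase (ivL lvL : List Char) (mc : Int) (inc : Bool) (M : List Bool) :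
    (if (!inc) = true then M
     else
       (PySem.List.pyRange 0 ((lvL.length : Int) - mc + 1) 1).foldl
         (fun mask i =>
           if PySem.Set.contains
               ((PySem.List.pyRange 0 ((ivL.length : Int) - mc + 1) 1).foldl
                 (fun s i => PySem.Set.add s (PySem.List.slice ivL (some i) (some (i + mc))))
                 PySem.Set.empty)
               (PySem.List.slice lvL (some i) (some (i + mc))) then
             (PySem.List.pyRange i (i + mc) 1).foldl
               (fun mask j => PySem.List.pySetD mask j true) mask
           else mask)
         M)
      = (if (inc && decide (mc > 0)) = true then
           (PySem.List.pyRange 0 ((lvL.length : Int) - mc + 1) 1).foldl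
             (fun mask i =>
               if PySem.Chars.isIn (PySem.List.slice lvL (some i) (some (i + mc))) ivL then
                 (PySem.List.pyRange i (i + mc) 1).foldl
                   (fun mask j => PySem.List.pySetD mask j true) mask
               else mask)
             M
         else M) := by
  cases inc with
  | false => simp
  | true =>
      rw [if_neg (by simp)]
      by_cases hmc : 0 < mc
      · rw [if_pos (by simp [hmc])]
        apply PySem.List.foldl_congr_mem
        intro acc x hx
        rw [PySem.List.mem_pyRange_one] at hx
        have hlen : (PySem.List.slice lvL (some x) (some (x + mc))).length = mc.toNat := by
          rw [PySem.List.slice_toNat _ (by omega) (by omega)]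
          simp only [List.length_take, List.length_drop]
          omega
        rw [pvSubsetMember ivL mc hmc _ hlen]
      · rw [if_neg (by simp [hmc])]
        rw [PySem.List.foldl_congr_mem _ _ (fun acc _ => acc) _ ?_]
        · exact PySem.List.foldl_ignore _ _
        · intro acc x hx
          rw [PySem.List.mem_pyRange_one] at hx
          rw [show PySem.List.pyRange x (x + mc) 1 = [] from PySem.List.pyRange_one_eq_nil (by omega)]
          simp

-- ===== VERDICT (by name: the statement is the Claim_ definition above) =====
theorem get_rhyme_mask_spec : Claim_equal_get_rhyme_mask := by
  intro iv lv mc inc _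
  unfold Spec_get_rhyme_mask
  simp only [get_rhyme_mask, get_rhyme_mask_alt]
  rw [get_match_length_eq]
  have hs_le : pvSuffixLen iv.toList.reverse lv.toList.reverse ≤ lv.toList.length := by
    simpa using pvSuffixLen_le iv.toList.reverse lv.toList.reverse
  by_cases hc : ((pvSuffixLen iv.toList.reverse lv.toList.reverse : Nat) : Int) ≥ mc
  · simp only [if_pos hc]
    rw [pvEndMask _ _ hs_le]
    exact pvInternalPhase _ _ _ _ _
  · simp only [if_neg hc]
    have h0 := pvEndMask lv.toList.length 0 (Nat.zero_le _)
    rw [PySem.List.pyRange_one_eq_nil (by simp)] at h0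
    simp only [List.foldl_nil, Nat.cast_zero] at h0
    rw [h0]
    exact pvInternalPhase _ _ _ _ _
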